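-- pv_equiv track=rewrite | github.com/DarknessNotFound/Dowgeon-Jones | calendarHelper.py | MonthFromWeekOfYear
-- ===== SOURCE A (Python) =====
-- WEEKS_PER_MONTH = {
--     1: 6,
--     2: 6,
--     3: 4,
--     4: 8,
--     5: 11,
--     6: 4,
--     7: 6,
--     8: 8,
--     9: 6,
--     10: 7,
--     11: 7
-- }
--
-- NUM_MONTHS_IN_YEAR = 11
--
-- def MonthFromWeekOfYear(week_num: int) -> int:
--     week_count = 0
--     for month in range(1, NUM_MONTHS_IN_YEAR + 1):
--         num_weeks = WEEKS_PER_MONTH[month]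
--         week_count  += num_weeks
--         if week_num <= week_count:
--             return month
--     return -1
-- ===== SOURCE B (Python) =====
-- # Cumulative-boundary table + hand-rolled binary search instead of A's per-month accumulation loop.
-- BOUNDARIES = [6, 12, 16, 24, 35, 39, 45, 53, 59, 66, 73]
--
-- def MonthFromWeekOfYear(week_num: int) -> int:
--     lo, hi = 0, len(BOUNDARIES)
--     while lo < hi:
--         mid = (lo + hi) // 2
--         if BOUNDARIES[mid] < week_num:
--             lo = mid + 1
--         else:
--             hi = mid
--     return lo + 1 if lo < len(BOUNDARIES) else -1
-- ===== Notes on version B (the rewrite author's own statement) =====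
-- stated objective: alternative
-- what changed: Replaced A's per-month loop that re-reads the WEEKS_PER_MONTH dict and accumulates a running week count with a precomputed cumulative-boundary table searched by a hand-rolled bisect_left binary search.
import Mathlib
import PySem

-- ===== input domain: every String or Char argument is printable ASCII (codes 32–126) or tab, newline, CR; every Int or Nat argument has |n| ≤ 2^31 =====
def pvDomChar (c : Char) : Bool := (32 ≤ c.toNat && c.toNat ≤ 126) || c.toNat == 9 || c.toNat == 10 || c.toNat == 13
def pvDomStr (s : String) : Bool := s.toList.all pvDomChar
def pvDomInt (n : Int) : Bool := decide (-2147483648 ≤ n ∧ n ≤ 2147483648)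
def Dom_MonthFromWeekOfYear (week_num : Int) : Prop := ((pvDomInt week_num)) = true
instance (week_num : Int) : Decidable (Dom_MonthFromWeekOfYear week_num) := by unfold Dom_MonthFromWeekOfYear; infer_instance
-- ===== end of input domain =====

-- B replaces A's per-month cumulative accumulation loop by a precomputed cumulative-boundary
-- table with a binary search over it (alternative structure, same result; no speed claim).


-- ===== PORT A =====
def weeksPerMonth : PySem.Dict Int Int :=
  PySem.Dict.ofList [(1, 6), (2, 6), (3, 4), (4, 8), (5, 11), (6, 4), (7, 6), (8, 8), (9, 6), (10, 7), (11, 7)]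

def numMonthsInYear : Int := 11

-- the for-loop of A with its early return: the list of months, accumulator week_count
def monthLoopA (week_num : Int) : List Int → Int → Int
  | [], _ => -1
  | m :: rest, week_count =>
    let num_weeks := (PySem.Dict.get? weeksPerMonth m).getD 0   -- key always present (1..11), so KeyError unreachable
    let week_count := week_count + num_weeks
    if week_num ≤ week_count then m else monthLoopA week_num rest week_count

def MonthFromWeekOfYear (week_num : Int) : Int :=
  monthLoopA week_num (PySem.List.pyRange 1 (numMonthsInYear + 1) 1) 0

-- ===== PORT B =====
def pvBoundaries : List Int := [6, 12, 16, 24, 35, 39, 45, 53, 59, 66, 73]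

-- the hand-rolled bisect_left while-loop of Source B (terminates since hi - lo shrinks)
def bisectLoop (week_num : Int) (lo hi : Nat) : Nat :=
  if lo < hi then
    let mid := (lo + hi) / 2
    if (PySem.List.pyGet? pvBoundaries (Int.ofNat mid)).getD 0 < week_num then
      bisectLoop week_num (mid + 1) hi
    else
      bisectLoop week_num lo mid
  else lo
termination_by hi - lo
decreasing_by all_goals omega

def MonthFromWeekOfYear_alt (week_num : Int) : Int :=
  let lo := bisectLoop week_num 0 pvBoundaries.length
  if lo < pvBoundaries.length then (lo : Int) + 1 else -1

-- ===== PRECONDITION & SPEC =====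
def Spec_MonthFromWeekOfYear (week_num : Int) (out : Int) : Prop := out = MonthFromWeekOfYear_alt week_num
instance (week_num : Int) (out : Int) : Decidable (Spec_MonthFromWeekOfYear week_num out) := by unfold Spec_MonthFromWeekOfYear; infer_instance

-- ===== CLAIM (what is proved, stated in full; the proofs are below) =====
def Claim_equal_MonthFromWeekOfYear : Prop := ∀ (week_num : Int), Dom_MonthFromWeekOfYear week_num → Spec_MonthFromWeekOfYear week_num (MonthFromWeekOfYear week_num)

-- ===== LEMMAS AND PROOFS =====
-- A's loop evaluates to the interval if-chain over the cumulative boundaries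
theorem loopA_eval (w : Int) : monthLoopA w [1,2,3,4,5,6,7,8,9,10,11] 0 =
  (if w ≤ 6 then 1 else if w ≤ 12 then 2 else if w ≤ 16 then 3 else if w ≤ 24 then 4 else if w ≤ 35 then 5 else if w ≤ 39 then 6 else if w ≤ 45 then 7 else if w ≤ 53 then 8 else if w ≤ 59 then 9 else if w ≤ 66 then 10 else if w ≤ 73 then 11 else (-1)) := by
  simp only [monthLoopA]
  norm_num [show (PySem.Dict.get? weeksPerMonth 1).getD 0 = 6 from by decide,
    show (PySem.Dict.get? weeksPerMonth 2).getD 0 = 6 from by decide,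
    show (PySem.Dict.get? weeksPerMonth 3).getD 0 = 4 from by decide,
    show (PySem.Dict.get? weeksPerMonth 4).getD 0 = 8 from by decide,
    show (PySem.Dict.get? weeksPerMonth 5).getD 0 = 11 from by decide,
    show (PySem.Dict.get? weeksPerMonth 6).getD 0 = 4 from by decide,
    show (PySem.Dict.get? weeksPerMonth 7).getD 0 = 6 from by decide,
    show (PySem.Dict.get? weeksPerMonth 8).getD 0 = 8 from by decide,
    show (PySem.Dict.get? weeksPerMonth 9).getD 0 = 6 from by decide,
    show (PySem.Dict.get? weeksPerMonth 10).getD 0 = 7 from by decide,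
    show (PySem.Dict.get? weeksPerMonth 11).getD 0 = 7 from by decide]

-- Source B's bisect_left loop evaluates to the first index whose boundary is ≥ w (11 if none)
set_option maxHeartbeats 4000000 in
theorem bisect_eval (w : Int) : bisectLoop w 0 11 =
  (if w ≤ 6 then (0 : Nat) else if w ≤ 12 then (1 : Nat) else if w ≤ 16 then (2 : Nat) else if w ≤ 24 then (3 : Nat) else if w ≤ 35 then (4 : Nat) else if w ≤ 39 then (5 : Nat) else if w ≤ 45 then (6 : Nat) else if w ≤ 53 then (7 : Nat) else if w ≤ 59 then (8 : Nat) else if w ≤ 66 then (9 : Nat) else if w ≤ 73 then (10 : Nat) else 11) := by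
  by_cases h0 : w ≤ 6
  · rw [bisectLoop]
    norm_num [show (PySem.List.pyGet? pvBoundaries 5).getD 0 = 39 from by decide, show ¬((39:Int) < w) from by omega]
    rw [bisectLoop]
    norm_num [show (PySem.List.pyGet? pvBoundaries 2).getD 0 = 16 from by decide, show ¬((16:Int) < w) from by omega]
    rw [bisectLoop]
    norm_num [show (PySem.List.pyGet? pvBoundaries 1).getD 0 = 12 from by decide, show ¬((12:Int) < w) from by omega]
    rw [bisectLoop]
    norm_num [show (PySem.List.pyGet? pvBoundaries 0).getD 0 = 6 from by decide, show ¬((6:Int) < w) from by omega]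
    rw [bisectLoop]
    norm_num
    split_ifs <;> omega
  by_cases h1 : w ≤ 12
  · rw [bisectLoop]
    norm_num [show (PySem.List.pyGet? pvBoundaries 5).getD 0 = 39 from by decide, show ¬((39:Int) < w) from by omega]
    rw [bisectLoop]
    norm_num [show (PySem.List.pyGet? pvBoundaries 2).getD 0 = 16 from by decide, show ¬((16:Int) < w) from by omega]
    rw [bisectLoop]
    norm_num [show (PySem.List.pyGet? pvBoundaries 1).getD 0 = 12 from by decide, show ¬((12:Int) < w) from by omega]
    rw [bisectLoop]
    norm_num [show (PySem.List.pyGet? pvBoundaries 0).getD 0 = 6 from by decide, show ((6:Int) < w) from by omega]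
    rw [bisectLoop]
    norm_num
    split_ifs <;> omega
  by_cases h2 : w ≤ 16
  · rw [bisectLoop]
    norm_num [show (PySem.List.pyGet? pvBoundaries 5).getD 0 = 39 from by decide, show ¬((39:Int) < w) from by omega]
    rw [bisectLoop]
    norm_num [show (PySem.List.pyGet? pvBoundaries 2).getD 0 = 16 from by decide, show ¬((16:Int) < w) from by omega]
    rw [bisectLoop]
    norm_num [show (PySem.List.pyGet? pvBoundaries 1).getD 0 = 12 from by decide, show ((12:Int) < w) from by omega]
    rw [bisectLoop]
    norm_num
    split_ifs <;> omega
  by_cases h3 : w ≤ 24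
  · rw [bisectLoop]
    norm_num [show (PySem.List.pyGet? pvBoundaries 5).getD 0 = 39 from by decide, show ¬((39:Int) < w) from by omega]
    rw [bisectLoop]
    norm_num [show (PySem.List.pyGet? pvBoundaries 2).getD 0 = 16 from by decide, show ((16:Int) < w) from by omega]
    rw [bisectLoop]
    norm_num [show (PySem.List.pyGet? pvBoundaries 4).getD 0 = 35 from by decide, show ¬((35:Int) < w) from by omega]
    rw [bisectLoop]
    norm_num [show (PySem.List.pyGet? pvBoundaries 3).getD 0 = 24 from by decide, show ¬((24:Int) < w) from by omega]
    rw [bisectLoop]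
    norm_num
    split_ifs <;> omega
  by_cases h4 : w ≤ 35
  · rw [bisectLoop]
    norm_num [show (PySem.List.pyGet? pvBoundaries 5).getD 0 = 39 from by decide, show ¬((39:Int) < w) from by omega]
    rw [bisectLoop]
    norm_num [show (PySem.List.pyGet? pvBoundaries 2).getD 0 = 16 from by decide, show ((16:Int) < w) from by omega]
    rw [bisectLoop]
    norm_num [show (PySem.List.pyGet? pvBoundaries 4).getD 0 = 35 from by decide, show ¬((35:Int) < w) from by omega]
    rw [bisectLoop]
    norm_num [show (PySem.List.pyGet? pvBoundaries 3).getD 0 = 24 from by decide, show ((24:Int) < w) from by omega]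
    rw [bisectLoop]
    norm_num
    split_ifs <;> omega
  by_cases h5 : w ≤ 39
  · rw [bisectLoop]
    norm_num [show (PySem.List.pyGet? pvBoundaries 5).getD 0 = 39 from by decide, show ¬((39:Int) < w) from by omega]
    rw [bisectLoop]
    norm_num [show (PySem.List.pyGet? pvBoundaries 2).getD 0 = 16 from by decide, show ((16:Int) < w) from by omega]
    rw [bisectLoop]
    norm_num [show (PySem.List.pyGet? pvBoundaries 4).getD 0 = 35 from by decide, show ((35:Int) < w) from by omega]
    rw [bisectLoop]
    norm_num
    split_ifs <;> omega
  by_cases h6 : w ≤ 45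
  · rw [bisectLoop]
    norm_num [show (PySem.List.pyGet? pvBoundaries 5).getD 0 = 39 from by decide, show ((39:Int) < w) from by omega]
    rw [bisectLoop]
    norm_num [show (PySem.List.pyGet? pvBoundaries 8).getD 0 = 59 from by decide, show ¬((59:Int) < w) from by omega]
    rw [bisectLoop]
    norm_num [show (PySem.List.pyGet? pvBoundaries 7).getD 0 = 53 from by decide, show ¬((53:Int) < w) from by omega]
    rw [bisectLoop]
    norm_num [show (PySem.List.pyGet? pvBoundaries 6).getD 0 = 45 from by decide, show ¬((45:Int) < w) from by omega]
    rw [bisectLoop]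
    norm_num
    split_ifs <;> omega
  by_cases h7 : w ≤ 53
  · rw [bisectLoop]
    norm_num [show (PySem.List.pyGet? pvBoundaries 5).getD 0 = 39 from by decide, show ((39:Int) < w) from by omega]
    rw [bisectLoop]
    norm_num [show (PySem.List.pyGet? pvBoundaries 8).getD 0 = 59 from by decide, show ¬((59:Int) < w) from by omega]
    rw [bisectLoop]
    norm_num [show (PySem.List.pyGet? pvBoundaries 7).getD 0 = 53 from by decide, show ¬((53:Int) < w) from by omega]
    rw [bisectLoop]
    norm_num [show (PySem.List.pyGet? pvBoundaries 6).getD 0 = 45 from by decide, show ((45:Int) < w) from by omega]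
    rw [bisectLoop]
    norm_num
    split_ifs <;> omega
  by_cases h8 : w ≤ 59
  · rw [bisectLoop]
    norm_num [show (PySem.List.pyGet? pvBoundaries 5).getD 0 = 39 from by decide, show ((39:Int) < w) from by omega]
    rw [bisectLoop]
    norm_num [show (PySem.List.pyGet? pvBoundaries 8).getD 0 = 59 from by decide, show ¬((59:Int) < w) from by omega]
    rw [bisectLoop]
    norm_num [show (PySem.List.pyGet? pvBoundaries 7).getD 0 = 53 from by decide, show ((53:Int) < w) from by omega]
    rw [bisectLoop]
    norm_num
    split_ifs <;> omega
  by_cases h9 : w ≤ 66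
  · rw [bisectLoop]
    norm_num [show (PySem.List.pyGet? pvBoundaries 5).getD 0 = 39 from by decide, show ((39:Int) < w) from by omega]
    rw [bisectLoop]
    norm_num [show (PySem.List.pyGet? pvBoundaries 8).getD 0 = 59 from by decide, show ((59:Int) < w) from by omega]
    rw [bisectLoop]
    norm_num [show (PySem.List.pyGet? pvBoundaries 10).getD 0 = 73 from by decide, show ¬((73:Int) < w) from by omega]
    rw [bisectLoop]
    norm_num [show (PySem.List.pyGet? pvBoundaries 9).getD 0 = 66 from by decide, show ¬((66:Int) < w) from by omega]
    rw [bisectLoop]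
    norm_num
    split_ifs <;> omega
  by_cases h10 : w ≤ 73
  · rw [bisectLoop]
    norm_num [show (PySem.List.pyGet? pvBoundaries 5).getD 0 = 39 from by decide, show ((39:Int) < w) from by omega]
    rw [bisectLoop]
    norm_num [show (PySem.List.pyGet? pvBoundaries 8).getD 0 = 59 from by decide, show ((59:Int) < w) from by omega]
    rw [bisectLoop]
    norm_num [show (PySem.List.pyGet? pvBoundaries 10).getD 0 = 73 from by decide, show ¬((73:Int) < w) from by omega]
    rw [bisectLoop]
    norm_num [show (PySem.List.pyGet? pvBoundaries 9).getD 0 = 66 from by decide, show ((66:Int) < w) from by omega]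
    rw [bisectLoop]
    norm_num
    split_ifs <;> omega
  · rw [bisectLoop]
    norm_num [show (PySem.List.pyGet? pvBoundaries 5).getD 0 = 39 from by decide, show ((39:Int) < w) from by omega]
    rw [bisectLoop]
    norm_num [show (PySem.List.pyGet? pvBoundaries 8).getD 0 = 59 from by decide, show ((59:Int) < w) from by omega]
    rw [bisectLoop]
    norm_num [show (PySem.List.pyGet? pvBoundaries 10).getD 0 = 73 from by decide, show ((73:Int) < w) from by omega]
    rw [bisectLoop]
    norm_num
    split_ifs <;> omega

set_option maxHeartbeats 4000000 in
theorem MonthFromWeekOfYear_eq (w : Int) : MonthFromWeekOfYear w = MonthFromWeekOfYear_alt w := by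
  have hr : PySem.List.pyRange 1 (numMonthsInYear + 1) 1 = [1,2,3,4,5,6,7,8,9,10,11] := by decide
  have hl : pvBoundaries.length = 11 := by decide
  rw [MonthFromWeekOfYear, hr, loopA_eval]
  rw [MonthFromWeekOfYear_alt]
  simp only [hl, bisect_eval w]
  by_cases g0 : w ≤ 6
  · norm_num [show (w ≤ (6:Int)) from by omega, show (w ≤ (12:Int)) from by omega, show (w ≤ (16:Int)) from by omega, show (w ≤ (24:Int)) from by omega, show (w ≤ (35:Int)) from by omega, show (w ≤ (39:Int)) from by omega, show (w ≤ (45:Int)) from by omega, show (w ≤ (53:Int)) from by omega, show (w ≤ (59:Int)) from by omega, show (w ≤ (66:Int)) from by omega, show (w ≤ (73:Int)) from by omega]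
  by_cases g1 : w ≤ 12
  · norm_num [show ¬(w ≤ (6:Int)) from by omega, show (w ≤ (12:Int)) from by omega, show (w ≤ (16:Int)) from by omega, show (w ≤ (24:Int)) from by omega, show (w ≤ (35:Int)) from by omega, show (w ≤ (39:Int)) from by omega, show (w ≤ (45:Int)) from by omega, show (w ≤ (53:Int)) from by omega, show (w ≤ (59:Int)) from by omega, show (w ≤ (66:Int)) from by omega, show (w ≤ (73:Int)) from by omega]
  by_cases g2 : w ≤ 16
  · norm_num [show ¬(w ≤ (6:Int)) from by omega, show ¬(w ≤ (12:Int)) from by omega, show (w ≤ (16:Int)) from by omega, show (w ≤ (24:Int)) from by omega, show (w ≤ (35:Int)) from by omega, show (w ≤ (39:Int)) from by omega, show (w ≤ (45:Int)) from by omega, show (w ≤ (53:Int)) from by omega, show (w ≤ (59:Int)) from by omega, show (w ≤ (66:Int)) from by omega, show (w ≤ (73:Int)) from by omega]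
  by_cases g3 : w ≤ 24
  · norm_num [show ¬(w ≤ (6:Int)) from by omega, show ¬(w ≤ (12:Int)) from by omega, show ¬(w ≤ (16:Int)) from by omega, show (w ≤ (24:Int)) from by omega, show (w ≤ (35:Int)) from by omega, show (w ≤ (39:Int)) from by omega, show (w ≤ (45:Int)) from by omega, show (w ≤ (53:Int)) from by omega, show (w ≤ (59:Int)) from by omega, show (w ≤ (66:Int)) from by omega, show (w ≤ (73:Int)) from by omega]
  by_cases g4 : w ≤ 35
  · norm_num [show ¬(w ≤ (6:Int)) from by omega, show ¬(w ≤ (12:Int)) from by omega, show ¬(w ≤ (16:Int)) from by omega, show ¬(w ≤ (24:Int)) from by omega, show (w ≤ (35:Int)) from by omega, show (w ≤ (39:Int)) from by omega, show (w ≤ (45:Int)) from by omega, show (w ≤ (53:Int)) from by omega, show (w ≤ (59:Int)) from by omega, show (w ≤ (66:Int)) from by omega, show (w ≤ (73:Int)) from by omega]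
  by_cases g5 : w ≤ 39
  · norm_num [show ¬(w ≤ (6:Int)) from by omega, show ¬(w ≤ (12:Int)) from by omega, show ¬(w ≤ (16:Int)) from by omega, show ¬(w ≤ (24:Int)) from by omega, show ¬(w ≤ (35:Int)) from by omega, show (w ≤ (39:Int)) from by omega, show (w ≤ (45:Int)) from by omega, show (w ≤ (53:Int)) from by omega, show (w ≤ (59:Int)) from by omega, show (w ≤ (66:Int)) from by omega, show (w ≤ (73:Int)) from by omega]
  by_cases g6 : w ≤ 45
  · norm_num [show ¬(w ≤ (6:Int)) from by omega, show ¬(w ≤ (12:Int)) from by omega, show ¬(w ≤ (16:Int)) from by omega, show ¬(w ≤ (24:Int)) from by omega, show ¬(w ≤ (35:Int)) from by omega, show ¬(w ≤ (39:Int)) from by omega, show (w ≤ (45:Int)) from by omega, show (w ≤ (53:Int)) from by omega, show (w ≤ (59:Int)) from by omega, show (w ≤ (66:Int)) from by omega, show (w ≤ (73:Int)) from by omega]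
  by_cases g7 : w ≤ 53
  · norm_num [show ¬(w ≤ (6:Int)) from by omega, show ¬(w ≤ (12:Int)) from by omega, show ¬(w ≤ (16:Int)) from by omega, show ¬(w ≤ (24:Int)) from by omega, show ¬(w ≤ (35:Int)) from by omega, show ¬(w ≤ (39:Int)) from by omega, show ¬(w ≤ (45:Int)) from by omega, show (w ≤ (53:Int)) from by omega, show (w ≤ (59:Int)) from by omega, show (w ≤ (66:Int)) from by omega, show (w ≤ (73:Int)) from by omega]
  by_cases g8 : w ≤ 59
  · norm_num [show ¬(w ≤ (6:Int)) from by omega, show ¬(w ≤ (12:Int)) from by omega, show ¬(w ≤ (16:Int)) from by omega, show ¬(w ≤ (24:Int)) from by omega, show ¬(w ≤ (35:Int)) from by omega, show ¬(w ≤ (39:Int)) from by omega, show ¬(w ≤ (45:Int)) from by omega, show ¬(w ≤ (53:Int)) from by omega, show (w ≤ (59:Int)) from by omega, show (w ≤ (66:Int)) from by omega, show (w ≤ (73:Int)) from by omega]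
  by_cases g9 : w ≤ 66
  · norm_num [show ¬(w ≤ (6:Int)) from by omega, show ¬(w ≤ (12:Int)) from by omega, show ¬(w ≤ (16:Int)) from by omega, show ¬(w ≤ (24:Int)) from by omega, show ¬(w ≤ (35:Int)) from by omega, show ¬(w ≤ (39:Int)) from by omega, show ¬(w ≤ (45:Int)) from by omega, show ¬(w ≤ (53:Int)) from by omega, show ¬(w ≤ (59:Int)) from by omega, show (w ≤ (66:Int)) from by omega, show (w ≤ (73:Int)) from by omega]
  by_cases g10 : w ≤ 73
  · norm_num [show ¬(w ≤ (6:Int)) from by omega, show ¬(w ≤ (12:Int)) from by omega, show ¬(w ≤ (16:Int)) from by omega, show ¬(w ≤ (24:Int)) from by omega, show ¬(w ≤ (35:Int)) from by omega, show ¬(w ≤ (39:Int)) from by omega, show ¬(w ≤ (45:Int)) from by omega, show ¬(w ≤ (53:Int)) from by omega, show ¬(w ≤ (59:Int)) from by omega, show ¬(w ≤ (66:Int)) from by omega, show (w ≤ (73:Int)) from by omega]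
  · norm_num [show ¬(w ≤ (6:Int)) from by omega, show ¬(w ≤ (12:Int)) from by omega, show ¬(w ≤ (16:Int)) from by omega, show ¬(w ≤ (24:Int)) from by omega, show ¬(w ≤ (35:Int)) from by omega, show ¬(w ≤ (39:Int)) from by omega, show ¬(w ≤ (45:Int)) from by omega, show ¬(w ≤ (53:Int)) from by omega, show ¬(w ≤ (59:Int)) from by omega, show ¬(w ≤ (66:Int)) from by omega, show ¬(w ≤ (73:Int)) from by omega]

-- ===== VERDICT (by name: the statement is the Claim_ definition above) =====
theorem MonthFromWeekOfYear_spec : Claim_equal_MonthFromWeekOfYear := by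
  intro w _
  exact (MonthFromWeekOfYear_eq w)
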